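-- pv_equiv track=rewrite | github.com/Yuxuan-Liang-git/UR5e_Torque | joint_test/sindy_utils.py | get_library_labels
-- ===== SOURCE A (Python) =====
-- def get_library_labels(vars_names, poly_order, include_sign=True):
--     """
--     Generates string labels for the library columns.
--     """
--     labels = ["1"]
--
--     # Order 1
--     labels.extend(vars_names)
--
--     # Order 2
--     if poly_order >= 2:
--         for i in range(len(vars_names)):
--             for j in range(i, len(vars_names)):
--                 labels.append(f"{vars_names[i]}*{vars_names[j]}")
--
--     # Order 3
--     if poly_order >= 3:
--         for i in range(len(vars_names)):
--             for j in range(i, len(vars_names)):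
--                 for k in range(j, len(vars_names)):
--                     labels.append(f"{vars_names[i]}*{vars_names[j]}*{vars_names[k]}")
--
--     if include_sign:
--         labels.append(f"sign({vars_names[1]})") # assumes dq is index 1
--
--     # Stribeck labels
--     vs_candidates = [0.01, 0.05, 0.1]
--     for vs in vs_candidates:
--         labels.append(f"exp(-(dq/{vs})^2)*sign(dq)")
--
--     return labels
-- ===== SOURCE B (Python) =====
-- def _cwr_into(xs, i, n, prefix, out):
--     """Append to `out`, in lexicographic index order, every combination-with-replacement
--     of `n` elements drawn from xs[i:], each prefixed by tuple `prefix` (suffix recursion)."""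
--     while True:
--         if n == 0:
--             out.append(prefix)
--             return
--         if i >= len(xs):
--             return
--         _cwr_into(xs, i, n - 1, prefix + (xs[i],), out)
--         i += 1
--
--
-- def _cwr(xs, n):
--     out = []
--     _cwr_into(xs, 0, n, (), out)
--     return out
--
--
-- def get_library_labels(vars_names, poly_order, include_sign=True):
--     labels = ["1"]
--     labels.extend(vars_names)
--     for order in range(2, min(poly_order, 3) + 1):
--         for combo in _cwr(vars_names, order):
--             labels.append("*".join(combo))
--     if include_sign:
--         labels.append(f"sign({vars_names[1]})")
--     for vs in [0.01, 0.05, 0.1]: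
--         labels.append(f"exp(-(dq/{vs})^2)*sign(dq)")
--     return labels
-- ===== Notes on version B (the rewrite author's own statement) =====
-- stated objective: alternative
-- what changed: Replaces A's two hardcoded order-2 and order-3 nested index-loop blocks with a single degree loop over a recursive suffix-based combinations-with-replacement generator whose tuples are joined with '*'.
import Mathlib
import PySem

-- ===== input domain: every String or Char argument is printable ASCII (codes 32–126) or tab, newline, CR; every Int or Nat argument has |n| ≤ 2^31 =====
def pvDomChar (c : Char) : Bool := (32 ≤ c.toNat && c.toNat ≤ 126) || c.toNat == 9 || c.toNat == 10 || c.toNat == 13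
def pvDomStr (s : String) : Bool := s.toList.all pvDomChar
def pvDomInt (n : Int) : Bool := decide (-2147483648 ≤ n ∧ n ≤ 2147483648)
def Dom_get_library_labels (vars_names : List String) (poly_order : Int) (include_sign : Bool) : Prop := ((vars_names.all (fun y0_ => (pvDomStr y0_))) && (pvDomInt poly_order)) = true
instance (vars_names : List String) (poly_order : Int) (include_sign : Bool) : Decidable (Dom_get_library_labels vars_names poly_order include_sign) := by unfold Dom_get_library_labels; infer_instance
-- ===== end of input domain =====

-- B replaces A's two hardcoded order-2/order-3 nested index-loop blocks by one degree loop over a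
-- recursive suffix-based combinations-with-replacement generator (objective: alternative decomposition).

-- ===== PORT A =====
def get_library_labels (vars_names : List String) (poly_order : Int) (include_sign : Bool) : List String :=
  let n : Int := vars_names.length
  let labels := ["1"] ++ vars_names
  let labels :=
    if 2 ≤ poly_order then
      (PySem.List.pyRange 0 n 1).foldl (fun acc i =>
        (PySem.List.pyRange i n 1).foldl (fun acc j =>
          acc ++ [PySem.List.pyGetD vars_names i "" ++ "*" ++ PySem.List.pyGetD vars_names j ""]) acc) labels
    else labels
  let labels :=
    if 3 ≤ poly_order then
      (PySem.List.pyRange 0 n 1).foldl (fun acc i =>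
        (PySem.List.pyRange i n 1).foldl (fun acc j =>
          (PySem.List.pyRange j n 1).foldl (fun acc k =>
            acc ++ [PySem.List.pyGetD vars_names i "" ++ "*" ++ PySem.List.pyGetD vars_names j "" ++ "*" ++ PySem.List.pyGetD vars_names k ""]) acc) acc) labels
    else labels
  let labels :=
    if include_sign then labels ++ ["sign(" ++ PySem.List.pyGetD vars_names 1 "" ++ ")"] else labels
  ["0.01", "0.05", "0.1"].foldl (fun acc vs => acc ++ ["exp(-(dq/" ++ vs ++ ")^2)*sign(dq)"]) labels

-- ===== PORT B =====
-- combinations with replacement, appended onto the accumulator `out`, by suffix recursion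
-- (Source B's _cwr_into; the Python index i into xs is rendered as the list suffix xs[i:])
def pvCwrInto : List String → Nat → List String → List (List String) → List (List String)
  | _, 0, pre, out => out ++ [pre]
  | [], _ + 1, _, out => out
  | x :: rest, n + 1, pre, out => pvCwrInto rest (n + 1) pre (pvCwrInto (x :: rest) n (pre ++ [x]) out)
termination_by xs n => (n, xs.length)

def pvCwr (xs : List String) (n : Nat) : List (List String) := pvCwrInto xs n [] []

def get_library_labels_alt (vars_names : List String) (poly_order : Int) (include_sign : Bool) : List String :=
  let labels := ["1"] ++ vars_names
  let labels :=
    (PySem.List.pyRange 2 (min poly_order 3 + 1) 1).foldl (fun acc order =>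
      (pvCwr vars_names order.toNat).foldl (fun acc c => acc ++ [PySem.Str.join "*" c]) acc) labels
  let labels :=
    if include_sign then labels ++ ["sign(" ++ PySem.List.pyGetD vars_names 1 "" ++ ")"] else labels
  ["0.01", "0.05", "0.1"].foldl (fun acc vs => acc ++ ["exp(-(dq/" ++ vs ++ ")^2)*sign(dq)"]) labels

-- ===== PRECONDITION & SPEC =====
-- Pre_ excludes exactly the inputs where A raises IndexError: include_sign with fewer than two variables.
def Pre_get_library_labels (vars_names : List String) (poly_order : Int) (include_sign : Bool) : Prop :=
  include_sign = true → 2 ≤ vars_names.length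
instance (vars_names : List String) (poly_order : Int) (include_sign : Bool) : Decidable (Pre_get_library_labels vars_names poly_order include_sign) := by unfold Pre_get_library_labels; infer_instance

def pvWitness_get_library_labels : List String × Int × Bool := (["q", "dq"], 3, true)

def Spec_get_library_labels (vars_names : List String) (poly_order : Int) (include_sign : Bool) (out : List String) : Prop := out = get_library_labels_alt vars_names poly_order include_sign
instance (vars_names : List String) (poly_order : Int) (include_sign : Bool) (out : List String) : Decidable (Spec_get_library_labels vars_names poly_order include_sign out) := by unfold Spec_get_library_labels; infer_instance

-- ===== CLAIM (what is proved, stated in full; the proofs are below) =====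
def Claim_equal_get_library_labels : Prop := ∀ (vars_names : List String) (poly_order : Int) (include_sign : Bool), Dom_get_library_labels vars_names poly_order include_sign → Pre_get_library_labels vars_names poly_order include_sign → Spec_get_library_labels vars_names poly_order include_sign (get_library_labels vars_names poly_order include_sign)

-- ===== LEMMAS AND PROOFS =====

-- proof-side non-accumulator form of pvCwrInto
def pvCwrRec : List String → Nat → List (List String)
  | _, 0 => [[]]
  | [], _ + 1 => []
  | x :: rest, n + 1 => (pvCwrRec (x :: rest) n).map (fun t => x :: t) ++ pvCwrRec rest (n + 1)
termination_by xs n => (n, xs.length)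

theorem pvCwrInto_eq : ∀ (n : Nat) (xs : List String) (pre : List String) (out : List (List String)),
    pvCwrInto xs n pre out = out ++ (pvCwrRec xs n).map (fun t => pre ++ t) := by
  intro n
  induction n with
  | zero => intro xs pre out; simp [pvCwrInto, pvCwrRec]
  | succ n ihn =>
      intro xs
      induction xs with
      | nil => intro pre out; simp [pvCwrInto, pvCwrRec]
      | cons x rest ihx =>
          intro pre out
          rw [show pvCwrInto (x :: rest) (n + 1) pre out
              = pvCwrInto rest (n + 1) pre (pvCwrInto (x :: rest) n (pre ++ [x]) out) by
                conv_lhs => rw [pvCwrInto]]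
          rw [ihn (x :: rest) (pre ++ [x]) out, ihx]
          simp [pvCwrRec, List.map_map, Function.comp, List.append_assoc]

theorem pvCwr_eq (xs : List String) (n : Nat) : pvCwr xs n = pvCwrRec xs n := by
  rw [pvCwr, pvCwrInto_eq]
  simp

-- concatenation of F applied to each element together with the suffix it heads
def pvSuffCat (F : String → List String → List String) : List String → List String
  | [] => []
  | x :: r => F x (x :: r) ++ pvSuffCat F r

-- a for-loop 'for i in range(k, len(xs))' whose body appends a block depending on xs[i]
-- and on the suffix xs[i:] equals the suffix recursion pvSuffCat
theorem pv_loop_suffix (xs : List String) (B : List String → Int → List String)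
    (F : String → List String → List String)
    (hB : ∀ (acc : List String) (i : Int), 0 ≤ i →
      B acc i = acc ++ F (PySem.List.pyGetD xs i "") (xs.drop i.toNat)) :
    ∀ (m k : Nat) (acc : List String), xs.length - k ≤ m →
      (PySem.List.pyRange (k : Int) (xs.length : Int) 1).foldl B acc
        = acc ++ pvSuffCat F (xs.drop k) := by
  intro m
  induction m with
  | zero =>
      intro k acc h
      have hk : xs.length ≤ k := by omega
      rw [PySem.List.pyRange_one_eq_nil (by exact_mod_cast hk)]
      rw [List.drop_eq_nil_of_le hk]
      simp [pvSuffCat]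
  | succ m ih =>
      intro k acc h
      by_cases hk : k < xs.length
      · rw [PySem.List.pyRange_one_cons (by exact_mod_cast hk)]
        simp only [List.foldl_cons]
        rw [hB acc (k : Int) (by positivity)]
        have hcast : ((k : Int) + 1) = ((k + 1 : Nat) : Int) := by push_cast; ring
        rw [hcast, ih (k + 1) _ (by omega)]
        rw [List.drop_eq_getElem_cons hk]
        simp only [pvSuffCat]
        rw [← List.drop_eq_getElem_cons hk]
        simp only [PySem.List.pyGetD_natCast, Int.toNat_natCast, List.getD_eq_getElem?_getD,
          List.getElem?_eq_getElem hk, Option.getD_some, List.append_assoc]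
      · have hk' : xs.length ≤ k := by omega
        rw [PySem.List.pyRange_one_eq_nil (by exact_mod_cast hk')]
        rw [List.drop_eq_nil_of_le hk']
        simp [pvSuffCat]

theorem pvCwrRec_one (xs : List String) : pvCwrRec xs 1 = xs.map (fun a => [a]) := by
  induction xs with
  | nil => simp [pvCwrRec]
  | cons x r ih => simp [pvCwrRec, ih]

theorem pvCwrRec_map_succ (g : List String → String) (n : Nat) (xs : List String) :
    (pvCwrRec xs (n + 1)).map g
      = pvSuffCat (fun x s => ((pvCwrRec s n).map (fun t => g (x :: t))).map (fun y => y)) xs := by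
  induction xs with
  | nil => simp [pvCwrRec, pvSuffCat]
  | cons x r ih => simp [pvCwrRec, pvSuffCat, ih, List.map_map, Function.comp]

theorem pvSuffCat_congr (F G : String → List String → List String)
    (h : ∀ x s, F x s = G x s) : ∀ xs, pvSuffCat F xs = pvSuffCat G xs := by
  intro xs
  induction xs with
  | nil => rfl
  | cons x r ih => simp only [pvSuffCat, h, ih]

theorem pv_join_pair (a b : String) : PySem.Str.join "*" [a, b] = a ++ "*" ++ b := by
  apply String.toList_inj.mp
  simp [PySem.Str.toList_join, PySem.Chars.join_cons_cons, PySem.Chars.join_singleton]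

theorem pv_join_triple (a b c : String) :
    PySem.Str.join "*" [a, b, c] = a ++ "*" ++ b ++ "*" ++ c := by
  apply String.toList_inj.mp
  simp [PySem.Str.toList_join, PySem.Chars.join_cons_cons, PySem.Chars.join_singleton]

-- B's order-2 block in suffix form
theorem pvCwrRec_two (xs : List String) :
    (pvCwrRec xs 2).map (PySem.Str.join "*")
      = pvSuffCat (fun x s => s.map (fun y => x ++ "*" ++ y)) xs := by
  rw [pvCwrRec_map_succ]
  apply pvSuffCat_congr
  intro x s
  simp [pvCwrRec_one, List.map_map, Function.comp, pv_join_pair]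

-- B's order-3 block in suffix form
theorem pvCwrRec_three (xs : List String) :
    (pvCwrRec xs 3).map (PySem.Str.join "*")
      = pvSuffCat (fun x s =>
          pvSuffCat (fun y t => t.map (fun z => x ++ "*" ++ y ++ "*" ++ z)) s) xs := by
  rw [pvCwrRec_map_succ]
  apply pvSuffCat_congr
  intro x s
  rw [List.map_id']
  rw [pvCwrRec_map_succ]
  apply pvSuffCat_congr
  intro y t
  simp [pvCwrRec_one, List.map_map, Function.comp, pv_join_triple]


-- A's order-2 double loop equals B's order-2 block
theorem pv_order2 (xs : List String) (acc : List String) :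
    (PySem.List.pyRange 0 (xs.length : Int) 1).foldl (fun acc i =>
        (PySem.List.pyRange i (xs.length : Int) 1).foldl (fun acc j =>
          acc ++ [PySem.List.pyGetD xs i "" ++ "*" ++ PySem.List.pyGetD xs j ""]) acc) acc
      = acc ++ (pvCwrRec xs 2).map (PySem.Str.join "*") := by
  rw [pvCwrRec_two]
  have hB : ∀ (acc : List String) (i : Int), 0 ≤ i →
      (PySem.List.pyRange i (xs.length : Int) 1).foldl (fun acc j =>
          acc ++ [PySem.List.pyGetD xs i "" ++ "*" ++ PySem.List.pyGetD xs j ""]) acc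
        = acc ++ (fun x s => s.map (fun y => x ++ "*" ++ y)) (PySem.List.pyGetD xs i "")
            (xs.drop i.toNat) := by
    intro acc i hi
    have hi' : (i : Int) = ((i.toNat : Nat) : Int) := by omega
    rw [hi', PySem.List.foldl_pyRange_pyGetD' xs ""
      (fun acc y => acc ++ [PySem.List.pyGetD xs ((i.toNat : Nat) : Int) "" ++ "*" ++ y]) acc (by positivity)]
    rw [PySem.List.foldl_append_singleton_eq_map]
  have h0 : ((0 : Nat) : Int) = (0 : Int) := by norm_num
  rw [← h0, pv_loop_suffix xs _ (fun x s => s.map (fun y => x ++ "*" ++ y)) hB xs.length 0 acc (by omega), List.drop_zero]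

-- A's order-3 triple loop equals B's order-3 block
theorem pv_order3 (xs : List String) (acc : List String) :
    (PySem.List.pyRange 0 (xs.length : Int) 1).foldl (fun acc i =>
        (PySem.List.pyRange i (xs.length : Int) 1).foldl (fun acc j =>
          (PySem.List.pyRange j (xs.length : Int) 1).foldl (fun acc k =>
            acc ++ [PySem.List.pyGetD xs i "" ++ "*" ++ PySem.List.pyGetD xs j "" ++ "*" ++ PySem.List.pyGetD xs k ""]) acc) acc) acc
      = acc ++ (pvCwrRec xs 3).map (PySem.Str.join "*") := by
  rw [pvCwrRec_three]
  have hInner : ∀ (x : String) (acc : List String) (j : Int), 0 ≤ j →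
      (PySem.List.pyRange j (xs.length : Int) 1).foldl (fun acc k =>
          acc ++ [x ++ "*" ++ PySem.List.pyGetD xs j "" ++ "*" ++ PySem.List.pyGetD xs k ""]) acc
        = acc ++ (fun y t => t.map (fun z => x ++ "*" ++ y ++ "*" ++ z)) (PySem.List.pyGetD xs j "")
            (xs.drop j.toNat) := by
    intro x acc j hj
    have hj' : (j : Int) = ((j.toNat : Nat) : Int) := by omega
    rw [hj', PySem.List.foldl_pyRange_pyGetD' xs ""
      (fun acc z => acc ++ [x ++ "*" ++ PySem.List.pyGetD xs ((j.toNat : Nat) : Int) "" ++ "*" ++ z]) acc (by positivity)]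
    rw [PySem.List.foldl_append_singleton_eq_map]
  have hB : ∀ (acc : List String) (i : Int), 0 ≤ i →
      (PySem.List.pyRange i (xs.length : Int) 1).foldl (fun acc j =>
          (PySem.List.pyRange j (xs.length : Int) 1).foldl (fun acc k =>
            acc ++ [PySem.List.pyGetD xs i "" ++ "*" ++ PySem.List.pyGetD xs j "" ++ "*" ++ PySem.List.pyGetD xs k ""]) acc) acc
        = acc ++ (fun x s =>
            pvSuffCat (fun y t => t.map (fun z => x ++ "*" ++ y ++ "*" ++ z)) s)
            (PySem.List.pyGetD xs i "") (xs.drop i.toNat) := by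
    intro acc i hi
    have hi' : (i : Int) = ((i.toNat : Nat) : Int) := by omega
    rw [hi', pv_loop_suffix xs _ (fun y t => t.map (fun z => PySem.List.pyGetD xs ((i.toNat : Nat) : Int) "" ++ "*" ++ y ++ "*" ++ z)) (hInner (PySem.List.pyGetD xs ((i.toNat : Nat) : Int) ""))
      xs.length i.toNat acc (by omega)]
    simp only [Int.toNat_natCast]
  have h0 : ((0 : Nat) : Int) = (0 : Int) := by norm_num
  rw [← h0, pv_loop_suffix xs _ (fun x s => pvSuffCat (fun y t => t.map (fun z => x ++ "*" ++ y ++ "*" ++ z)) s) hB xs.length 0 acc (by omega), List.drop_zero]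

-- ===== VERDICT (by name: the statement is the Claim_ definition above) =====
theorem get_library_labels_spec : Claim_equal_get_library_labels := by
  intro xs po s _ _
  unfold Spec_get_library_labels get_library_labels get_library_labels_alt
  simp only []
  congr 1
  have ht2 : ((2 : Int)).toNat = 2 := rfl
  have ht3 : ((3 : Int)).toNat = 3 := rfl
  by_cases h3 : 3 ≤ po
  · have h2 : 2 ≤ po := by omega
    have hmin : min po 3 = 3 := by omega
    rw [if_pos h2, if_pos h3, hmin]
    have hr : PySem.List.pyRange 2 (3 + 1) 1 = [2, 3] := by decide
    rw [hr]
    simp only [List.foldl_cons, List.foldl_nil, ht2, ht3]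
    rw [PySem.List.foldl_append_singleton_eq_map, PySem.List.foldl_append_singleton_eq_map,
      pvCwr_eq, pvCwr_eq, pv_order2, pv_order3]
  · by_cases h2 : 2 ≤ po
    · have hpo : po = 2 := by omega
      have hmin : min po 3 = po := by omega
      rw [if_pos h2, if_neg h3, hmin, hpo]
      have hr : PySem.List.pyRange 2 (2 + 1) 1 = [2] := by decide
      rw [hr]
      simp only [List.foldl_cons, List.foldl_nil, ht2]
      rw [PySem.List.foldl_append_singleton_eq_map, pvCwr_eq, pv_order2]
    · have hmin : min po 3 = po := by omega
      rw [if_neg h2, if_neg h3, hmin]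
      rw [PySem.List.pyRange_one_eq_nil (by omega)]
      simp
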